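-- pv_equiv track=rewrite | github.com/kingoz9000/Drone | Data/Bernie_analyzer.py | detect_out_of_order
-- ===== SOURCE A (Python) =====
-- def detect_out_of_order(seq_list):
--     out_of_order = []
--     max_seen = -1
--     for s in seq_list:
--         if s < max_seen:
--             out_of_order.append(True)
--         else:
--             out_of_order.append(False)
--             max_seen = s
--     return out_of_order
-- ===== SOURCE B (Python) =====
-- def detect_out_of_order(seq_list):
--     # exclusive prefix maximum seeded at -1, then a comparison pass
--     pmax = []
--     m = -1
--     for s in seq_list:
--         pmax.append(m)
--         m = max(m, s)
--     return [s < p for s, p in zip(seq_list, pmax)]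
-- ===== Notes on version B (the rewrite author's own statement) =====
-- stated objective: alternative
-- what changed: Replaced the fused loop (flag and conditionally update max in one pass) by two separate passes: first build the exclusive prefix-maximum sequence seeded at -1, then compare each element against it.
import Mathlib
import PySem

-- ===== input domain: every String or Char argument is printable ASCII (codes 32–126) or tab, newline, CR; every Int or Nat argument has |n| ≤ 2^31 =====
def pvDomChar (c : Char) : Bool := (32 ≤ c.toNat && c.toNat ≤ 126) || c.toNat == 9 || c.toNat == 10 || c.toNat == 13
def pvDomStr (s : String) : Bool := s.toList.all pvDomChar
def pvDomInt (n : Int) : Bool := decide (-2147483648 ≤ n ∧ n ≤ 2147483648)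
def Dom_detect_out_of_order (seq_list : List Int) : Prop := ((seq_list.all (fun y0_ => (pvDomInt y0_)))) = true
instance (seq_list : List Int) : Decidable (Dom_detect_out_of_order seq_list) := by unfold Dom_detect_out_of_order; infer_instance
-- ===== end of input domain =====

-- B separates A's fused loop into two passes: build the exclusive prefix-maximum
-- sequence seeded at -1, then compare elementwise (alternative decomposition, same cost).


-- ===== PORT A =====
def detect_out_of_order (seq_list : List Int) : List Bool :=
  (seq_list.foldl
    (fun (st : List Bool × Int) s =>
      if s < st.2 then (st.1 ++ [true], st.2) else (st.1 ++ [false], s))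
    ([], -1)).1

-- ===== PORT B =====
-- first pass: exclusive prefix maximum seeded at m
def pmaxAux : List Int → Int → List Int
  | [], _ => []
  | s :: t, m => m :: pmaxAux t (max m s)

def detect_out_of_order_alt (seq_list : List Int) : List Bool :=
  (seq_list.zip (pmaxAux seq_list (-1))).map (fun p => decide (p.1 < p.2))

-- ===== PRECONDITION & SPEC =====
def Spec_detect_out_of_order (seq_list : List Int) (out : List Bool) : Prop := out = detect_out_of_order_alt seq_list
instance (seq_list : List Int) (out : List Bool) : Decidable (Spec_detect_out_of_order seq_list out) := by unfold Spec_detect_out_of_order; infer_instance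

-- ===== CLAIM (what is proved, stated in full; the proofs are below) =====
def Claim_equal_detect_out_of_order : Prop := ∀ (seq_list : List Int), Dom_detect_out_of_order seq_list → Spec_detect_out_of_order seq_list (detect_out_of_order seq_list)

-- ===== LEMMAS AND PROOFS =====
theorem detect_loop_eq (xs : List Int) : ∀ (m : Int) (acc : List Bool),
    (xs.foldl
      (fun (st : List Bool × Int) s =>
        if s < st.2 then (st.1 ++ [true], st.2) else (st.1 ++ [false], s))
      (acc, m)).1
    = acc ++ (xs.zip (pmaxAux xs m)).map (fun p => decide (p.1 < p.2)) := by
  induction xs with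
  | nil => intro m acc; simp
  | cons s t ih =>
    intro m acc
    by_cases h : s < m
    · have hm : max m s = m := by omega
      simp [List.foldl, h, pmaxAux, hm, ih]
    · have hm : max m s = s := by omega
      simp [List.foldl, h, pmaxAux, hm, ih]

-- ===== VERDICT (by name: the statement is the Claim_ definition above) =====
theorem detect_out_of_order_spec : Claim_equal_detect_out_of_order := by
  intro xs _
  unfold Spec_detect_out_of_order detect_out_of_order detect_out_of_order_alt
  simpa using detect_loop_eq xs (-1) []
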